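-- pv_equiv track=rewrite | github.com/michaldziwisz/apollo | addon/synthDrivers/apollo2/formants.py | get_formant_adjust_commands
-- ===== SOURCE A (Python) =====
-- def get_formant_adjust_commands(index: int, diff: int) -> list[str]:
-- 	if not diff:
-- 		return []
-- 	sign = "+" if diff > 0 else "-"
-- 	remaining = abs(int(diff))
-- 	commands: list[str] = []
-- 	while remaining > 0:
-- 		chunk = min(0xFF, remaining)
-- 		commands.append(f"@u{index}{chunk:02X}{sign} ")
-- 		remaining -= chunk
-- 	return commands
-- ===== SOURCE B (Python) =====
-- def get_formant_adjust_commands(index: int, diff: int) -> list[str]: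
--     if not diff:
--         return []
--     sign = "+" if diff > 0 else "-"
--     full, rem = divmod(abs(int(diff)), 0xFF)
--     commands = [f"@u{index}FF{sign} "] * full
--     if rem:
--         commands.append(f"@u{index}{rem:02X}{sign} ")
--     return commands
-- ===== Notes on version B (the rewrite author's own statement) =====
-- stated objective: simpler
-- what changed: Replaces the subtract-255 loop with a closed-form divmod: full copies of the FF command are produced by list multiplication and the remainder command is appended only when the remainder is nonzero.
import Mathlib
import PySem

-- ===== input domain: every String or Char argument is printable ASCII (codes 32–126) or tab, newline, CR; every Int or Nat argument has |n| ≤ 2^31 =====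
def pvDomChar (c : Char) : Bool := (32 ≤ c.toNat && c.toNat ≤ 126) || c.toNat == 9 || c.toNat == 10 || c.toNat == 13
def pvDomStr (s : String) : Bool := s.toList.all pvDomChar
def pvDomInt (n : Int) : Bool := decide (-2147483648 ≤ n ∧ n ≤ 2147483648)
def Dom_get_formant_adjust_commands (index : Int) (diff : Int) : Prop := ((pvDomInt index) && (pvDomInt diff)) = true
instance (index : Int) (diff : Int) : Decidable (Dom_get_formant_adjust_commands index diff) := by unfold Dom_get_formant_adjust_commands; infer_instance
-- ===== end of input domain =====

-- B replaces A's subtract-255 loop by a closed-form divmod: replicate the FF command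
-- `full` times and append the remainder command only when the remainder is nonzero.

-- one uppercase hex digit (exact for 0 ≤ n ≤ 15)
def pvHexDigit (n : Nat) : String :=
  if n < 10 then PySem.Int.toStr (Int.ofNat n)
  else String.ofList [Char.ofNat (65 + (n - 10))]

-- Python's f"{n:02X}", exact for 0 ≤ n ≤ 255 (the only values used here)
def pvHex2 (n : Nat) : String := pvHexDigit (n / 16) ++ pvHexDigit (n % 16)

-- f"@u{index}{chunk:02X}{sign} "
def pvCmd (index : Int) (chunk : Nat) (sign : String) : String :=
  "@u" ++ PySem.Int.toStr index ++ pvHex2 chunk ++ sign ++ " "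

-- ===== PORT A =====
-- the while-loop: remaining > 0 → emit min(0xFF, remaining) and subtract it
def pvLoopA (index : Int) (sign : String) (remaining : Nat) : List String :=
  if remaining > 0 then
    let chunk := min 255 remaining
    pvCmd index chunk sign :: pvLoopA index sign (remaining - chunk)
  else []
termination_by remaining
decreasing_by omega

def get_formant_adjust_commands (index : Int) (diff : Int) : List String :=
  if diff = 0 then []
  else
    let sign := if diff > 0 then "+" else "-"
    pvLoopA index sign diff.natAbs

-- ===== PORT B =====
-- f"@u{index}FF{sign} " (literal "FF" as in Source B)
def pvCmdFF (index : Int) (sign : String) : String :=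
  "@u" ++ PySem.Int.toStr index ++ "FF" ++ sign ++ " "

def get_formant_adjust_commands_alt (index : Int) (diff : Int) : List String :=
  if diff = 0 then []
  else
    let sign := if diff > 0 then "+" else "-"
    let full := diff.natAbs / 255
    let rem := diff.natAbs % 255
    let commands := List.replicate full (pvCmdFF index sign)
    if rem ≠ 0 then commands ++ [pvCmd index rem sign] else commands

-- ===== PRECONDITION & SPEC =====
def Spec_get_formant_adjust_commands (index : Int) (diff : Int) (out : List String) : Prop := out = get_formant_adjust_commands_alt index diff
instance (index : Int) (diff : Int) (out : List String) : Decidable (Spec_get_formant_adjust_commands index diff out) := by unfold Spec_get_formant_adjust_commands; infer_instance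

-- ===== CLAIM (what is proved, stated in full; the proofs are below) =====
def Claim_equal_get_formant_adjust_commands : Prop := ∀ (index : Int) (diff : Int), Dom_get_formant_adjust_commands index diff → Spec_get_formant_adjust_commands index diff (get_formant_adjust_commands index diff)

-- ===== LEMMAS AND PROOFS =====
theorem pvCmd_255 (index : Int) (sign : String) : pvCmd index 255 sign = pvCmdFF index sign := by
  simp [pvCmd, pvCmdFF, pvHex2, pvHexDigit]

theorem pvLoopA_closed (index : Int) (sign : String) (r : Nat) :
    pvLoopA index sign r =
      List.replicate (r / 255) (pvCmdFF index sign) ++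
        (if r % 255 ≠ 0 then [pvCmd index (r % 255) sign] else []) := by
  induction r using Nat.strong_induction_on with
  | _ r ih =>
    rw [pvLoopA]
    by_cases h : r > 0
    · simp only [if_pos h]
      by_cases h255 : r < 255
      · have h1 : min 255 r = r := by omega
        have h2 : r / 255 = 0 := by omega
        have h3 : r % 255 = r := by omega
        rw [h1, h2, h3]
        have : r - r = 0 := by omega
        rw [this, pvLoopA]
        simp
        omega
      · have h1 : min 255 r = 255 := by omega
        rw [h1, ih (r - 255) (by omega)]
        have hd : (r - 255) / 255 = r / 255 - 1 := by omega
        have hm : (r - 255) % 255 = r % 255 := by omega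
        have hq : r / 255 = (r / 255 - 1) + 1 := by omega
        rw [hd, hm, hq, List.replicate_succ, pvCmd_255]
        simp
    · have hr : r = 0 := by omega
      simp [hr]

theorem get_formant_adjust_commands_spec : Claim_equal_get_formant_adjust_commands := by
  intro index diff _
  unfold Spec_get_formant_adjust_commands get_formant_adjust_commands get_formant_adjust_commands_alt
  by_cases h : diff = 0
  · simp [h]
  · simp only [if_neg h]
    rw [pvLoopA_closed]
    split_ifs <;> simp
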